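-- pv_equiv track=rewrite | github.com/jakeydo/AoC | AoC2023/AoC2023d12/main.py | evaluate
-- ===== SOURCE A (Python) =====
-- def evaluate(c):
--     counts = []
--     current_count = 0
--     for ch in c:
--         if ch == "." and current_count != 0:
--             counts.append(current_count)
--             current_count = 0
--         elif ch!= ".":
--             current_count += 1
--     if current_count !=0:
--         counts.append(current_count)
--     return counts
-- ===== SOURCE B (Python) =====
-- from itertools import groupby
--
-- def evaluate(c):
--     return [sum(1 for _ in g) for is_dot, g in groupby(c, key=lambda ch: ch == ".") if not is_dot]
-- ===== Notes on version B (the rewrite author's own statement) =====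
-- stated objective: idiomatic
-- what changed: Replaces the manual accumulator loop with final-flush branch by itertools.groupby keyed on the dot-predicate, taking the length of each non-dot group.
import Mathlib
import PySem

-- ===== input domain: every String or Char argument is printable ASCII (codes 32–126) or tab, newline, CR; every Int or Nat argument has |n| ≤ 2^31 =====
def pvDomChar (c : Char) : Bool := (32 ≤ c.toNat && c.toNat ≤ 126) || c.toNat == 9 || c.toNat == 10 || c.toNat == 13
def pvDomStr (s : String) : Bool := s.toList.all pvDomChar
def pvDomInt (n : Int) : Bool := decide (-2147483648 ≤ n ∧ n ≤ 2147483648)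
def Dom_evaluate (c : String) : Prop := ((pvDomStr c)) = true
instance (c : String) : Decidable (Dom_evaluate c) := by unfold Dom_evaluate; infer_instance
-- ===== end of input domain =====

-- B replaces A's manual accumulator with a final-flush branch by a groupby over the
-- dot-predicate, appending the length of each non-dot group (idiomatic decomposition).

-- ===== PORT A =====
-- A's loop state: (counts, current_count); the for-loop is a foldl, then the final flush.
def pvStepA (s : List Int × Int) (ch : Char) : List Int × Int :=
  if ch == '.' && s.2 != 0 then (s.1 ++ [s.2], 0)
  else if ch != '.' then (s.1, s.2 + 1)
  else s

def evaluate (c : String) : List Int :=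
  let r := c.toList.foldl pvStepA ([], 0)
  if r.2 != 0 then r.1 ++ [r.2] else r.1

-- ===== PORT B =====
-- groupby with key (ch == '.'): pvSpan takes the leading non-dot run (its length, as the
-- Python len of the group) and the rest; pvRuns walks the groups, keeping non-dot lengths.
def pvSpan : List Char → Int × List Char
  | [] => (0, [])
  | h :: t => if h == '.' then (0, h :: t)
              else let (n, r) := pvSpan t; (n + 1, r)

theorem pvSpan_len_le : ∀ (l : List Char), (pvSpan l).2.length ≤ l.length := by
  intro l
  induction l with
  | nil => simp [pvSpan]
  | cons h t ih =>
    simp only [pvSpan]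
    split
    · simp
    · simpa using Nat.le_succ_of_le ih

def pvRuns : List Char → List Int
  | [] => []
  | h :: t =>
    if h == '.' then pvRuns t
    else
      let p := pvSpan t
      (p.1 + 1) :: pvRuns p.2
termination_by l => l.length
decreasing_by
  · simp
  · exact Nat.lt_succ_of_le (pvSpan_len_le t)

def evaluate_alt (c : String) : List Int := pvRuns c.toList

-- ===== PRECONDITION & SPEC =====
def Spec_evaluate (c : String) (out : List Int) : Prop := out = evaluate_alt c
instance (c : String) (out : List Int) : Decidable (Spec_evaluate c out) := by unfold Spec_evaluate; infer_instance

-- ===== CLAIM (what is proved, stated in full; the proofs are below) =====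
def Claim_equal_evaluate : Prop := ∀ (c : String), Dom_evaluate c → Spec_evaluate c (evaluate c)

-- ===== LEMMAS AND PROOFS =====

def pvFinish (s : List Int × Int) : List Int := if s.2 != 0 then s.1 ++ [s.2] else s.1

-- Combined loop invariant for A's fold against B's group decomposition.
theorem pvLoop_inv : ∀ (l : List Char),
    (∀ acc : List Int, pvFinish (l.foldl pvStepA (acc, 0)) = acc ++ pvRuns l) ∧
    (∀ (acc : List Int) (cur : Int), 0 < cur →
      pvFinish (l.foldl pvStepA (acc, cur)) =
        acc ++ ((cur + (pvSpan l).1) :: pvRuns (pvSpan l).2)) := by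
  intro l
  induction l with
  | nil =>
    constructor
    · intro acc; simp [pvFinish, pvRuns]
    · intro acc cur hcur; simp [pvFinish, pvSpan, pvRuns, hcur.ne']
  | cons h t ih =>
    obtain ⟨ih0, ih1⟩ := ih
    constructor
    · intro acc
      by_cases hd : h = '.'
      · subst hd
        simp only [List.foldl_cons, pvStepA, bne_self_eq_false, Bool.and_false,
          Bool.false_eq_true, if_false, bne_self_eq_false]
        rw [ih0 acc]
        simp [pvRuns]
      · have hb : (h == '.') = false := by simp [hd]
        simp only [List.foldl_cons, pvStepA, hb, Bool.false_and, Bool.false_eq_true, if_false]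
        rw [show ((h != '.')) = true by simp [bne, hb]]
        simp only [if_true]
        rw [ih1 acc (0 + 1) (by norm_num)]
        simp [pvRuns, hb, add_comm]
    · intro acc cur hcur
      by_cases hd : h = '.'
      · subst hd
        simp only [List.foldl_cons, pvStepA]
        rw [show (('.' == '.') && (cur != 0)) = true by simp [bne, hcur.ne']]
        simp only [if_true]
        rw [ih0 (acc ++ [cur])]
        simp [pvSpan, pvRuns]
      · have hb : (h == '.') = false := by simp [hd]
        simp only [List.foldl_cons, pvStepA, hb, Bool.false_and, Bool.false_eq_true, if_false]
        rw [show ((h != '.')) = true by simp [bne, hb]]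
        simp only [if_true]
        rw [ih1 acc (cur + 1) (by positivity)]
        simp only [pvSpan, hb, Bool.false_eq_true, if_false]
        have : cur + 1 + (pvSpan t).1 = cur + ((pvSpan t).1 + 1) := by ring
        simp [this]

-- ===== VERDICT (by name: the statement is the Claim_ definition above) =====
theorem evaluate_spec : Claim_equal_evaluate := by
  intro c _
  unfold Spec_evaluate evaluate evaluate_alt
  simpa [pvFinish] using (pvLoop_inv c.toList).1 []
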